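-- pv_equiv track=rewrite | github.com/mukerem/WebScrapping | codeforces/archive/The_Doctor_Meets_Vader_(Easy)_1184B1.py | maximum_gold_each_spaceship_can_steal
-- ===== SOURCE A (Python) =====
-- from bisect import bisect_right
-- from typing import List, Tuple
--
-- def maximum_gold_each_spaceship_can_steal(s: int, b: int, a: List[int], bases: List[Tuple[int, int]]) -> List[int]:
--     bases = sorted(bases)
--     cummulative_summation = []
--     total = 0
--     for power, gold in bases:
--         total += gold
--         cummulative_summation.append(total)
--
--     bases_power = [power for power, gold in bases]
--     max_gold = []
--     for power in a:
--         r = bisect_right(bases_power, power)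
--         if r == 0:
--             max_gold.append(0)
--             continue
--         r -= 1
--         gold = cummulative_summation[r]
--         max_gold.append(gold)
--     return max_gold
-- ===== SOURCE B (Python) =====
-- def maximum_gold_each_spaceship_can_steal(s, b, a, bases):
--     # For each spaceship, sum directly the gold of every base it can attack.
--     return [sum(gold for power, gold in bases if power <= q) for q in a]
-- ===== Notes on version B (the rewrite author's own statement) =====
-- stated objective: simpler
-- what changed: Replaced sort + running prefix sums + per-query binary search (bisect_right with an off-by-one index dance) by a one-line direct per-query sum over the unsorted bases.
import Mathlib
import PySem

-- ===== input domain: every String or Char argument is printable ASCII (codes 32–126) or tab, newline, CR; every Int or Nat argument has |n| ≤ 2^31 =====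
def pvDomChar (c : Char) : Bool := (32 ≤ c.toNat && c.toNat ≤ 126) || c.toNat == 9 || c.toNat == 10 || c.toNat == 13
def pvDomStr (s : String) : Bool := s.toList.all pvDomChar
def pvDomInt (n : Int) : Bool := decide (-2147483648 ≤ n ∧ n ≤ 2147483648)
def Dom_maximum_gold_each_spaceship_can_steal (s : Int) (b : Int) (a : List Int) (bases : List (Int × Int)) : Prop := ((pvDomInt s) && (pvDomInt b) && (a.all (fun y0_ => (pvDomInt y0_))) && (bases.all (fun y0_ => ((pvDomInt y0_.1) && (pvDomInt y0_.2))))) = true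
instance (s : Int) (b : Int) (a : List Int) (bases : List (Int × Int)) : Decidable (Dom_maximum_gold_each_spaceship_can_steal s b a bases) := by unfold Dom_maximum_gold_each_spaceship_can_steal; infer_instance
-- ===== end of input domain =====

-- B replaces A's sort + prefix sums + per-query binary search by a direct per-query
-- sum over the unsorted bases: simpler (one comprehension), not faster.

-- ===== PORT A =====
def maximum_gold_each_spaceship_can_steal (s : Int) (b : Int) (a : List Int) (bases : List (Int × Int)) : List Int :=
  let bases2 := PySem.List.sorted2 bases Prod.fst Prod.snd
  let cummulative_summation :=
    (bases2.foldl (fun (st : Int × List Int) pg => (st.1 + pg.2, st.2 ++ [st.1 + pg.2]))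
      ((0 : Int), ([] : List Int))).2
  let bases_power := bases2.map Prod.fst
  a.foldl (fun max_gold power =>
    let r := PySem.List.bisectRight bases_power power
    if r = 0 then max_gold ++ [0]
    else max_gold ++ [PySem.List.pyGetD cummulative_summation ((r : Int) - 1) 0]) []

-- ===== PORT B =====
def maximum_gold_each_spaceship_can_steal_alt (s : Int) (b : Int) (a : List Int) (bases : List (Int × Int)) : List Int :=
  a.map (fun q => ((bases.filter (fun pg => decide (pg.1 ≤ q))).map Prod.snd).sum)

-- ===== PRECONDITION & SPEC =====
def Spec_maximum_gold_each_spaceship_can_steal (s : Int) (b : Int) (a : List Int) (bases : List (Int × Int)) (out : List Int) : Prop := out = maximum_gold_each_spaceship_can_steal_alt s b a bases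
instance (s : Int) (b : Int) (a : List Int) (bases : List (Int × Int)) (out : List Int) : Decidable (Spec_maximum_gold_each_spaceship_can_steal s b a bases out) := by unfold Spec_maximum_gold_each_spaceship_can_steal; infer_instance

-- ===== CLAIM (what is proved, stated in full; the proofs are below) =====
def Claim_equal_maximum_gold_each_spaceship_can_steal : Prop := ∀ (s : Int) (b : Int) (a : List Int) (bases : List (Int × Int)), Dom_maximum_gold_each_spaceship_can_steal s b a bases → Spec_maximum_gold_each_spaceship_can_steal s b a bases (maximum_gold_each_spaceship_can_steal s b a bases)

-- ===== LEMMAS AND PROOFS =====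

-- insertBy with a comparison that respects a key preserves sortedness by that key
lemma pv_insertBy_pairwise {α : Type} (key : α → Int) (before : α → α → Bool)
    (h1 : ∀ x y, before x y = true → key x ≤ key y)
    (h2 : ∀ x y, before x y = false → key y ≤ key x)
    (x : α) (ys : List α) (hys : ys.Pairwise (fun u v => key u ≤ key v)) :
    (PySem.List.insertBy before x ys).Pairwise (fun u v => key u ≤ key v) := by
  induction ys with
  | nil => simp [PySem.List.insertBy]
  | cons y ys ih =>
    rw [List.pairwise_cons] at hys
    by_cases hb : before x y = true
    · simp only [PySem.List.insertBy, hb, if_true]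
      refine List.pairwise_cons.mpr ⟨?_, List.pairwise_cons.mpr ⟨hys.1, hys.2⟩⟩
      intro z hz
      rcases List.mem_cons.mp hz with rfl | hz
      · exact h1 _ _ hb
      · exact le_trans (h1 _ _ hb) (hys.1 z hz)
    · simp only [PySem.List.insertBy, hb]
      refine List.pairwise_cons.mpr ⟨?_, ih hys.2⟩
      intro z hz
      rcases (PySem.List.mem_insertBy before x z ys).mp hz with rfl | hz
      · exact h2 _ _ (by simpa using hb)
      · exact hys.1 z hz

lemma pv_foldl_insertBy_pairwise {α : Type} (key : α → Int) (before : α → α → Bool)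
    (h1 : ∀ x y, before x y = true → key x ≤ key y)
    (h2 : ∀ x y, before x y = false → key y ≤ key x) :
    ∀ (l : List α) (acc : List α), acc.Pairwise (fun u v => key u ≤ key v) →
      (l.foldl (fun acc x => PySem.List.insertBy before x acc) acc).Pairwise (fun u v => key u ≤ key v) := by
  intro l
  induction l with
  | nil => intro acc h; simpa using h
  | cons x l ih =>
    intro acc h
    exact ih _ (pv_insertBy_pairwise key before h1 h2 x acc h)

-- sorted(bases) (lexicographic) is in particular sorted by first component
lemma pv_sorted2_pairwise_fst (bases : List (Int × Int)) :
    (PySem.List.sorted2 bases Prod.fst Prod.snd false).Pairwise (fun u v => u.1 ≤ v.1) := by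
  unfold PySem.List.sorted2
  simp only [Bool.false_eq_true, if_false]
  refine pv_foldl_insertBy_pairwise (fun pg => pg.1) _ ?_ ?_ bases [] (by simp)
  · intro x y h
    dsimp only at h ⊢
    by_cases h1 : x.1 < y.1
    · omega
    · simp only [h1, decide_false, Bool.false_or, Bool.and_eq_true, Bool.not_eq_true',
        decide_eq_false_iff_not, decide_eq_true_eq] at h
      omega
  · intro x y h
    dsimp only at h ⊢
    simp only [Bool.or_eq_false_iff, decide_eq_false_iff_not] at h
    omega

-- the prefix-sum loop of A, characterised
lemma pv_cum_snd (L : List (Int × Int)) : ∀ (t : Int) (acc : List Int),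
    (L.foldl (fun (st : Int × List Int) pg => (st.1 + pg.2, st.2 ++ [st.1 + pg.2])) (t, acc)).2
    = acc ++ (List.range L.length).map (fun i => t + ((L.take (i+1)).map Prod.snd).sum) := by
  induction L with
  | nil => intro t acc; simp
  | cons pg L ih =>
    intro t acc
    simp only [List.foldl_cons, ih]
    rw [List.length_cons, List.range_succ_eq_map]
    simp only [List.map_cons, List.map_map]
    rw [List.append_assoc]
    congr 1
    simp only [List.take_succ_cons, List.map_cons, List.sum_cons, List.take_zero,
      List.map_nil, List.sum_nil, add_zero, List.singleton_append]
    congr 1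
    apply List.map_congr_left
    intro i _
    simp [Function.comp, add_assoc]

-- the per-query value A computes equals B's direct filtered sum
lemma pv_per_query (bases : List (Int × Int)) (q : Int) :
    (if PySem.List.bisectRight (List.map Prod.fst (PySem.List.sorted2 bases Prod.fst Prod.snd)) q = 0
      then (0 : Int)
      else PySem.List.pyGetD
        ((PySem.List.sorted2 bases Prod.fst Prod.snd).foldl
          (fun (st : Int × List Int) pg => (st.1 + pg.2, st.2 ++ [st.1 + pg.2]))
          ((0 : Int), ([] : List Int))).2
        ((PySem.List.bisectRight (List.map Prod.fst (PySem.List.sorted2 bases Prod.fst Prod.snd)) q : Int) - 1) 0)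
    = ((bases.filter (fun pg => decide (pg.1 ≤ q))).map Prod.snd).sum := by
  have hperm : (PySem.List.sorted2 bases Prod.fst Prod.snd).Perm bases :=
    PySem.List.sorted2_perm bases Prod.fst Prod.snd false
  have hpair := pv_sorted2_pairwise_fst bases
  generalize hLg : PySem.List.sorted2 bases Prod.fst Prod.snd = L at hperm hpair ⊢
  have hbp : (L.map Prod.fst).Pairwise (· ≤ ·) := List.pairwise_map.mpr hpair
  obtain ⟨hrle, hlt, hge⟩ := PySem.List.bisectRight_spec (L.map Prod.fst) q hbp
  set r := PySem.List.bisectRight (List.map Prod.fst L) q with hr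
  rw [List.length_map] at hrle
  -- the filtered list is exactly the first r elements of the sorted list
  have hfilter : L.filter (fun pg => decide (pg.1 ≤ q)) = L.take r := by
    conv_lhs => rw [← List.take_append_drop r L]
    rw [List.filter_append]
    have h1 : (L.take r).filter (fun pg => decide (pg.1 ≤ q)) = L.take r := by
      rw [List.filter_eq_self]
      intro x hx
      obtain ⟨j, hj, hxj⟩ := List.mem_iff_getElem.mp hx
      have hj' : j < L.length := lt_of_lt_of_le hj (by simp [List.length_take])
      rw [List.getElem_take] at hxj
      have hjr : j < r := lt_of_lt_of_le hj (by simp [List.length_take])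
      have := hlt j (by simpa using hj') hjr
      rw [List.getElem_map] at this
      subst hxj
      simpa
    have h2 : (L.drop r).filter (fun pg => decide (pg.1 ≤ q)) = [] := by
      rw [List.filter_eq_nil_iff]
      intro x hx
      obtain ⟨j, hj, hxj⟩ := List.mem_iff_getElem.mp hx
      rw [List.getElem_drop] at hxj
      have hj' : r + j < L.length := by
        have := hj; rw [List.length_drop] at this; omega
      have := hge (r + j) (by simpa using hj') (by omega)
      rw [List.getElem_map] at this
      subst hxj
      simp; omega
    rw [h1, h2, List.append_nil]
  -- reduce B's sum over bases to a sum over the sorted list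
  have hsum : ((bases.filter (fun pg => decide (pg.1 ≤ q))).map Prod.snd).sum
      = ((L.take r).map Prod.snd).sum := by
    rw [← hfilter]
    exact (((hperm.filter (fun pg => decide (pg.1 ≤ q))).map Prod.snd).sum_eq).symm
  rw [hsum]
  by_cases hr0 : r = 0
  · rw [if_pos hr0, hr0]; simp
  · rw [if_neg hr0]
    have hr1 : 1 ≤ r := Nat.one_le_iff_ne_zero.mpr hr0
    rw [pv_cum_snd]
    have hcast : ((r : Int) - 1) = ((r - 1 : Nat) : Int) := by
      push_cast [hr1]; ring
    rw [hcast, PySem.List.pyGetD_natCast]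
    have hlen : r - 1 < L.length := by omega
    rw [List.nil_append, List.getD_eq_getElem?_getD, List.getElem?_map,
      List.getElem?_range hlen]
    simp only [Option.map_some, Option.getD_some]
    rw [show r - 1 + 1 = r from by omega]
    ring

-- ===== VERDICT (by name: the statement is the Claim_ definition above) =====
theorem maximum_gold_each_spaceship_can_steal_spec : Claim_equal_maximum_gold_each_spaceship_can_steal := by
  intro s b a bases _
  unfold Spec_maximum_gold_each_spaceship_can_steal
  unfold maximum_gold_each_spaceship_can_steal maximum_gold_each_spaceship_can_steal_alt
  simp only []
  have hbody : ∀ (acc : List Int), ∀ power ∈ a,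
      (if PySem.List.bisectRight (List.map Prod.fst (PySem.List.sorted2 bases Prod.fst Prod.snd)) power = 0
        then acc ++ [0]
        else acc ++ [PySem.List.pyGetD
          ((PySem.List.sorted2 bases Prod.fst Prod.snd).foldl
            (fun (st : Int × List Int) pg => (st.1 + pg.2, st.2 ++ [st.1 + pg.2]))
            ((0 : Int), ([] : List Int))).2
          ((PySem.List.bisectRight (List.map Prod.fst (PySem.List.sorted2 bases Prod.fst Prod.snd)) power : Int) - 1) 0])
      = acc ++ [((bases.filter (fun pg => decide (pg.1 ≤ power))).map Prod.snd).sum] := by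
    intro acc power _
    rw [← pv_per_query bases power]
    exact (apply_ite (fun v : Int => acc ++ [v]) _ _ _).symm
  rw [PySem.List.foldl_congr_mem a _ _ [] hbody,
    PySem.List.foldl_append_singleton_eq_map, List.nil_append]
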